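-- pv_equiv track=rewrite | github.com/MDadopoulos/VeritasX | workspace/src/tools/route_files.py | fy_to_calendar_months
-- ===== SOURCE A (Python) =====
-- def fy_to_calendar_months(fy_year: int) -> list[tuple[int, int]]:
--     """
--     Return the 12 (year, month) tuples for a US fiscal year.
--
--     US fiscal year YYYY = October (YYYY-1) through September (YYYY).
--     """
--     months = []
--     prev = fy_year - 1
--     for month in range(10, 13):   # Oct, Nov, Dec of previous year
--         months.append((prev, month))
--     for month in range(1, 10):    # Jan-Sep of fiscal year
--         months.append((fy_year, month))
--     return months
-- ===== SOURCE B (Python) =====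
-- def fy_to_calendar_months(fy_year: int) -> list[tuple[int, int]]:
--     """Return the 12 (year, month) tuples for a US fiscal year.
--
--     Single arithmetic pass: each of the 12 months is the absolute month
--     ordinal (fy_year - 1) * 12 + 9 + i, split by divmod into (year, month-1).
--     """
--     months = []
--     for i in range(12):
--         total = (fy_year - 1) * 12 + 9 + i
--         year, m = divmod(total, 12)
--         months.append((year, m + 1))
--     return months
-- ===== Notes on version B (the rewrite author's own statement) =====
-- stated objective: alternative
-- what changed: Replaces the two hard-coded Oct-Dec / Jan-Sep range passes and the explicit prev variable with one uniform pass over range(12) that computes each (year, month) by divmod on an absolute month ordinal.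
import Mathlib
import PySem

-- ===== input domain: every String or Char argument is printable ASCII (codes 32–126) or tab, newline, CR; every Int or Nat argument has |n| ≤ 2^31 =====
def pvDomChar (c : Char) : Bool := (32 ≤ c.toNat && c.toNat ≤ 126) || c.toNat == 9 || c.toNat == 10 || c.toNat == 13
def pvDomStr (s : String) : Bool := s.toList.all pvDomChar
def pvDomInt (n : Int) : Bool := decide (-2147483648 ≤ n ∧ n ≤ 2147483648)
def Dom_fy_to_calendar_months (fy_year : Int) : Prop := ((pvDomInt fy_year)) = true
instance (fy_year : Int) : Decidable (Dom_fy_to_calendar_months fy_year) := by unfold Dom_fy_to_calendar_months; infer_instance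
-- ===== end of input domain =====

-- B replaces A's two hard-coded range passes by one divmod pass over range(12); objective: alternative decomposition.

-- ===== PORT A =====
def fy_to_calendar_months (fy_year : Int) : List (Int × Int) :=
  let months : List (Int × Int) := []
  let prev := fy_year - 1
  let months := (PySem.List.pyRange 10 13 1).foldl
    (fun acc month => acc ++ [(prev, month)]) months
  let months := (PySem.List.pyRange 1 10 1).foldl
    (fun acc month => acc ++ [(fy_year, month)]) months
  months

-- ===== PORT B =====
def fy_to_calendar_months_alt (fy_year : Int) : List (Int × Int) :=
  (PySem.List.pyRange 0 12 1).foldl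
    (fun acc i =>
      let total := (fy_year - 1) * 12 + 9 + i
      let year := PySem.Int.floordiv total 12   -- divmod(total, 12): divisor is the literal 12 ≠ 0, so exact
      let m := PySem.Int.mod total 12
      acc ++ [(year, m + 1)]) []

-- ===== PRECONDITION & SPEC =====
def Spec_fy_to_calendar_months (fy_year : Int) (out : List (Int × Int)) : Prop := out = fy_to_calendar_months_alt fy_year
instance (fy_year : Int) (out : List (Int × Int)) : Decidable (Spec_fy_to_calendar_months fy_year out) := by unfold Spec_fy_to_calendar_months; infer_instance

-- ===== CLAIM (what is proved, stated in full; the proofs are below) =====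
def Claim_equal_fy_to_calendar_months : Prop := ∀ (fy_year : Int), Dom_fy_to_calendar_months fy_year → Spec_fy_to_calendar_months fy_year (fy_to_calendar_months fy_year)

-- ===== LEMMAS AND PROOFS =====

-- ===== VERDICT (by name: the statement is the Claim_ definition above) =====
theorem fy_to_calendar_months_spec : Claim_equal_fy_to_calendar_months := by
  intro fy _
  show fy_to_calendar_months fy = fy_to_calendar_months_alt fy
  have h1 : PySem.List.pyRange 10 13 1 = [10, 11, 12] := by decide
  have h2 : PySem.List.pyRange 1 10 1 = [1, 2, 3, 4, 5, 6, 7, 8, 9] := by decide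
  have h3 : PySem.List.pyRange 0 12 1 = [0, 1, 2, 3, 4, 5, 6, 7, 8, 9, 10, 11] := by decide
  simp only [fy_to_calendar_months, fy_to_calendar_months_alt, h1, h2, h3, List.foldl,
    List.nil_append, List.cons_append, List.cons.injEq, Prod.mk.injEq]
  repeat' constructor
  all_goals
    try rw [PySem.Int.floordiv_eq_ediv_of_pos (by norm_num : (0:Int) < 12)]
  all_goals
    try rw [PySem.Int.mod_eq_emod_of_pos (by norm_num : (0:Int) < 12)]
  all_goals omega
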